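-- pv_equiv track=rewrite | github.com/paxtrip/agentic_exocortex | backend/src/services/semantic_analyzer.py | _have_contrasting_concepts
-- ===== SOURCE A (Python) =====
-- from typing import Any, Dict, List, Optional, Tuple
--
-- def _have_contrasting_concepts(
--     concepts1: List[str], concepts2: List[str]
-- ) -> bool:
--     """
--     Check if documents have contrasting concepts.
--
--     Args:
--         concepts1, concepts2: Concept lists
--
--     Returns:
--         True if contrasting concepts found
--     """
--     # Simple heuristic: look for opposite concepts
--     opposites = [
--         ("consciousness", "unconsciousness"),
--         ("evolution", "stagnation"),
--         ("creative", "mechanical"),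
--         ("networks", "isolation"),
--     ]
--
--     set1 = set(concepts1)
--     set2 = set(concepts2)
--
--     for opp1, opp2 in opposites:
--         if (opp1 in set1 and opp2 in set2) or (opp2 in set1 and opp1 in set2):
--             return True
--
--     return False
-- ===== SOURCE B (Python) =====
-- def _have_contrasting_concepts(concepts1, concepts2):
--     """Check if documents have contrasting concepts (single scan of concepts1
--     with an opposite-of function and plain membership in concepts2)."""
--
--     def opposite_of(c):
--         if c == "consciousness":
--             return "unconsciousness"
--         elif c == "unconsciousness":
--             return "consciousness"
--         elif c == "evolution":
--             return "stagnation"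
--         elif c == "stagnation":
--             return "evolution"
--         elif c == "creative":
--             return "mechanical"
--         elif c == "mechanical":
--             return "creative"
--         elif c == "networks":
--             return "isolation"
--         elif c == "isolation":
--             return "networks"
--         else:
--             return None
--
--     for c in concepts1:
--         o = opposite_of(c)
--         if o is not None and o in concepts2:
--             return True
--     return False
-- ===== Notes on version B (the rewrite author's own statement) =====
-- stated objective: alternative
-- what changed: Instead of scanning the fixed pair table against two materialised sets, B scans concepts1 once with an opposite-of branch function and checks the opposite's membership directly in concepts2; no sets or pair table are built.
import Mathlib
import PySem

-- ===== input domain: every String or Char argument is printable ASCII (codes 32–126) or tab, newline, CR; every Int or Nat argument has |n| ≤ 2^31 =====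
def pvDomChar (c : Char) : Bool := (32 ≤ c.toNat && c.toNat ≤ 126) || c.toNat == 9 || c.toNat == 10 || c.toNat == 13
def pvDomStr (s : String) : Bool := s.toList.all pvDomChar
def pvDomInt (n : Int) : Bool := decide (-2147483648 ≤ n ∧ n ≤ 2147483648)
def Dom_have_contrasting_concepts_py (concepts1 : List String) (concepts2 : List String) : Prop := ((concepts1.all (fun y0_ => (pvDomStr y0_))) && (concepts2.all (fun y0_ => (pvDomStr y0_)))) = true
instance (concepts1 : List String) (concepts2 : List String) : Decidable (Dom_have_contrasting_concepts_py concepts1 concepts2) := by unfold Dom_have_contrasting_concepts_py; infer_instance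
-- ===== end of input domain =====

-- B replaces A's pair-table scan against two materialised sets with a single scan of
-- concepts1 using an opposite-of branch function and direct membership in concepts2
-- (objective: alternative decomposition; no sets or pair table built).

-- ===== PORT A =====
def have_contrasting_concepts_py (concepts1 : List String) (concepts2 : List String) : Bool :=
  let opposites : List (String × String) :=
    [("consciousness", "unconsciousness"),
     ("evolution", "stagnation"),
     ("creative", "mechanical"),
     ("networks", "isolation")]
  let set1 : PySem.Set String := PySem.Set.ofList concepts1
  let set2 : PySem.Set String := PySem.Set.ofList concepts2
  -- 'for opp1, opp2 in opposites: if …: return True' / 'return False' = any over the pair list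
  opposites.any (fun p =>
    (PySem.Set.contains set1 p.1 && PySem.Set.contains set2 p.2) ||
    (PySem.Set.contains set1 p.2 && PySem.Set.contains set2 p.1))

-- ===== PORT B =====
-- 'def opposite_of(c): if/elif chain else None'
def pvOppositeOf (c : String) : Option String :=
  if c = "consciousness" then some "unconsciousness"
  else if c = "unconsciousness" then some "consciousness"
  else if c = "evolution" then some "stagnation"
  else if c = "stagnation" then some "evolution"
  else if c = "creative" then some "mechanical"
  else if c = "mechanical" then some "creative"
  else if c = "networks" then some "isolation"
  else if c = "isolation" then some "networks"
  else none

-- 'for c in concepts1: … return True' / 'return False': loop with early return as structural recursion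
def pvGoContrast (concepts2 : List String) : List String → Bool
  | [] => false
  | c :: rest =>
    match pvOppositeOf c with
    | some o => if concepts2.contains o then true else pvGoContrast concepts2 rest
    | none => pvGoContrast concepts2 rest

def have_contrasting_concepts_py_alt (concepts1 : List String) (concepts2 : List String) : Bool :=
  pvGoContrast concepts2 concepts1

-- ===== PRECONDITION & SPEC =====
def Spec_have_contrasting_concepts_py (concepts1 : List String) (concepts2 : List String) (out : Bool) : Prop := out = have_contrasting_concepts_py_alt concepts1 concepts2
instance (concepts1 : List String) (concepts2 : List String) (out : Bool) : Decidable (Spec_have_contrasting_concepts_py concepts1 concepts2 out) := by unfold Spec_have_contrasting_concepts_py; infer_instance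

-- ===== CLAIM =====
def Claim_equal_have_contrasting_concepts_py : Prop := ∀ (concepts1 : List String) (concepts2 : List String), Dom_have_contrasting_concepts_py concepts1 concepts2 → Spec_have_contrasting_concepts_py concepts1 concepts2 (have_contrasting_concepts_py concepts1 concepts2)

-- ===== LEMMAS AND PROOFS =====

-- B's recursion as an existential: true iff some concept of the scanned list has an
-- opposite occurring in concepts2.
lemma pvGoContrast_iff (c2 : List String) (l : List String) :
    pvGoContrast c2 l = true ↔ ∃ c ∈ l, ∃ o, pvOppositeOf c = some o ∧ o ∈ c2 := by
  induction l with
  | nil => simp [pvGoContrast]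
  | cons c rest ih =>
    simp only [pvGoContrast, List.mem_cons]
    cases h : pvOppositeOf c with
    | none =>
      rw [ih]
      constructor
      · rintro ⟨x, hx, o, ho, hm⟩; exact ⟨x, Or.inr hx, o, ho, hm⟩
      · rintro ⟨x, rfl | hx, o, ho, hm⟩
        · rw [h] at ho; cases ho
        · exact ⟨x, hx, o, ho, hm⟩
    | some o =>
      dsimp only
      by_cases hm : c2.contains o = true
      · rw [if_pos hm]
        constructor
        · intro _; exact ⟨c, Or.inl rfl, o, h, by simpa using hm⟩
        · intro _; rfl
      · rw [if_neg hm, ih]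
        constructor
        · rintro ⟨x, hx, o', ho', hmem⟩; exact ⟨x, Or.inr hx, o', ho', hmem⟩
        · rintro ⟨x, rfl | hx, o', ho', hmem⟩
          · rw [h] at ho'; cases ho'
            exact absurd (by simpa using hmem) (by simpa using hm)
          · exact ⟨x, hx, o', ho', hmem⟩

lemma ports_agree (c1 c2 : List String) :
    have_contrasting_concepts_py c1 c2 = have_contrasting_concepts_py_alt c1 c2 := by
  simp only [have_contrasting_concepts_py, have_contrasting_concepts_py_alt]
  rw [Bool.eq_iff_iff, pvGoContrast_iff]
  simp only [List.any_cons, List.any_nil, Bool.or_eq_true, Bool.and_eq_true, Bool.false_eq_true,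
    or_false, PySem.Set.contains, List.contains_iff_mem, PySem.Set.mem_ofList]
  constructor
  · rintro (⟨⟨h1,h2⟩|⟨h1,h2⟩⟩|⟨⟨h1,h2⟩|⟨h1,h2⟩⟩|⟨⟨h1,h2⟩|⟨h1,h2⟩⟩|⟨⟨h1,h2⟩|⟨h1,h2⟩⟩) <;>
      exact ⟨_, h1, _, rfl, h2⟩
  · rintro ⟨c, hc, o, ho, hmem⟩
    simp only [pvOppositeOf] at ho
    split_ifs at ho <;> simp_all

-- ===== VERDICT =====
theorem have_contrasting_concepts_py_spec : Claim_equal_have_contrasting_concepts_py := by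
  intro c1 c2 _
  exact ports_agree c1 c2
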